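-- pv_equiv track=rewrite | github.com/MrBrantCode/unitest_baseline | mut_generate/mist_train_taco/taco_4345/solution.py | count_spruces
-- ===== SOURCE A (Python) =====
-- def count_spruces(test_cases):
--     results = []
--
--     for (n, m), matrix in test_cases:
--         b = [[0] * m for _ in range(n)]
--         total_spruces = 0
--
--         for i in range(n - 1, -1, -1):
--             for j in range(m):
--                 if matrix[i][j] == '*':
--                     if i == n - 1:
--                         b[i][j] = 1
--                         total_spruces += 1
--                     elif j == 0 or j == m - 1:
--                         b[i][j] = 1
--                         total_spruces += 1
--                     else:
--                         x = b[i + 1][j - 1:j + 2]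
--                         b[i][j] = min(x) + 1
--                         total_spruces += b[i][j]
--
--         results.append(total_spruces)
--
--     return results
-- ===== SOURCE B (Python) =====
-- def count_spruces(test_cases):
--     results = []
--     for (n, m), matrix in test_cases:
--         total = 0
--         for i in range(n):
--             for j in range(m):
--                 if matrix[i][j] == '*':
--                     k = 0
--                     while (i + k < n and j - k >= 0 and j + k < m
--                            and all(matrix[i + k][c] == '*' for c in range(j - k, j + k + 1))):
--                         k += 1
--                     total += k
--         results.append(total)
--     return results
-- ===== Notes on version B (the rewrite author's own statement) =====
-- stated objective: alternative
-- what changed: Replaces A's bottom-up DP table (each cell's height from the min of the three cells below it) with a direct per-apex downward widening scan: for every '*' cell, k grows while row i+k columns j-k..j+k are all '*' inside the n x m window, and k is added to the total - no auxiliary table is built.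
import Mathlib
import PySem

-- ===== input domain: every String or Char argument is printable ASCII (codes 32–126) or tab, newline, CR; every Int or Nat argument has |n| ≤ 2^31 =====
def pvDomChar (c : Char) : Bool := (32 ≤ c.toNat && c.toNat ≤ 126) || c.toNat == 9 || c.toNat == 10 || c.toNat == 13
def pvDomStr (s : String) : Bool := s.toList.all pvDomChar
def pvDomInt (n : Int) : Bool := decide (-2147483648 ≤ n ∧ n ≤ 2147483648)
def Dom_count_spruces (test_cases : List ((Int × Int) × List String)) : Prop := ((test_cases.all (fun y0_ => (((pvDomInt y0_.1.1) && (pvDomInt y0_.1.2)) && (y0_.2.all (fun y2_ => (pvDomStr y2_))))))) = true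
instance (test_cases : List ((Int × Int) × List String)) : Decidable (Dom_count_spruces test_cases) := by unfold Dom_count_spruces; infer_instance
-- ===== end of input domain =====

-- B replaces A's bottom-up DP table with an independent downward widening scan at each apex
-- ('alternative' objective, no speed claim); the return value is proved equal test case by test case.

-- ===== PORT A =====

-- shared cell access: matrix[i][j] as a Char; out-of-range access is excluded by Pre_count_spruces,
-- so the defaults are never read on admitted inputs
def pvCell (matrix : List String) (i j : Int) : Char :=
  (PySem.Str.pyGet? (PySem.List.pyGetD matrix i "") j).getD ' '

-- the body of A's outer `for (n, m), matrix in test_cases` loop: one test case's total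
def pvCaseA (tc : (Int × Int) × List String) : Int :=
  let n := tc.1.1
  let m := tc.1.2
  let matrix := tc.2
  -- b = [[0] * m for _ in range(n)]
  let b0 : List (List Int) :=
    (PySem.List.pyRange 0 n 1).map (fun _ => (PySem.List.pyRange 0 m 1).map (fun _ => (0 : Int)))
  let st :=
    (PySem.List.pyRange (n - 1) (-1) (-1)).foldl (fun (st : List (List Int) × Int) i =>
      (PySem.List.pyRange 0 m 1).foldl (fun (st : List (List Int) × Int) j =>
        if pvCell matrix i j == '*' then
          if i == n - 1 then
            (PySem.List.pySetD st.1 i (PySem.List.pySetD (PySem.List.pyGetD st.1 i []) j 1), st.2 + 1)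
          else if j == 0 || j == m - 1 then
            (PySem.List.pySetD st.1 i (PySem.List.pySetD (PySem.List.pyGetD st.1 i []) j 1), st.2 + 1)
          else
            let x := PySem.List.slice (PySem.List.pyGetD st.1 (i + 1) []) (some (j - 1)) (some (j + 2))
            let v := (PySem.List.min? x (fun y => y)).getD 0 + 1
            (PySem.List.pySetD st.1 i (PySem.List.pySetD (PySem.List.pyGetD st.1 i []) j v), st.2 + v)
        else st) st) (b0, (0 : Int))
  st.2

def count_spruces (test_cases : List ((Int × Int) × List String)) : List Int :=
  test_cases.foldl (fun results tc => results ++ [pvCaseA tc]) []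

-- ===== PORT B =====

-- all(matrix[a][c] == '*' for c in range(l, r + 1))
def pvRowAll (matrix : List String) (a l r : Int) : Bool :=
  (PySem.List.pyRange l (r + 1) 1).all (fun c => pvCell matrix a c == '*')

-- the while loop of B: k grows while a spruce of height k+1 fits at apex (i, j);
-- fuel (n - i).toNat + 1 always suffices because the loop needs i + k < n
def pvApexLoop (matrix : List String) (n m i j : Int) : Nat → Int → Int
  | 0, k => k
  | fuel + 1, k =>
      if i + k < n ∧ 0 ≤ j - k ∧ j + k < m ∧ pvRowAll matrix (i + k) (j - k) (j + k) = true then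
        pvApexLoop matrix n m i j fuel (k + 1)
      else k

-- the body of B's outer loop: one test case's total
def pvCaseB (tc : (Int × Int) × List String) : Int :=
  let n := tc.1.1
  let m := tc.1.2
  let matrix := tc.2
  (PySem.List.pyRange 0 n 1).foldl (fun total i =>
    (PySem.List.pyRange 0 m 1).foldl (fun total j =>
      if pvCell matrix i j == '*' then
        total + pvApexLoop matrix n m i j ((n - i).toNat + 1) 0
      else total) total) 0

def count_spruces_alt (test_cases : List ((Int × Int) × List String)) : List Int :=
  test_cases.map pvCaseB

-- ===== PRECONDITION & SPEC =====

-- Pre_ excludes exactly the inputs where Python A raises IndexError: a test case whose declared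
-- n × m window (when nonempty, i.e. n > 0 and m > 0) reaches past the end of the matrix or past
-- the end of one of its first n rows.
def Pre_count_spruces (test_cases : List ((Int × Int) × List String)) : Prop :=
  ∀ tc ∈ test_cases, 0 < tc.1.1 → 0 < tc.1.2 →
    tc.1.1 ≤ (tc.2.length : Int) ∧
    ∀ row ∈ tc.2.take tc.1.1.toNat, tc.1.2 ≤ (row.toList.length : Int)

instance (test_cases : List ((Int × Int) × List String)) : Decidable (Pre_count_spruces test_cases) := by
  unfold Pre_count_spruces; infer_instance

def pvWitness_count_spruces : (List ((Int × Int) × List String)) :=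
  [((2, 3), [".*.", "***"]), ((1, 1), ["*"]), ((0, 5), [])]

def Spec_count_spruces (test_cases : List ((Int × Int) × List String)) (out : List Int) : Prop := out = count_spruces_alt test_cases
instance (test_cases : List ((Int × Int) × List String)) (out : List Int) : Decidable (Spec_count_spruces test_cases out) := by unfold Spec_count_spruces; infer_instance

-- ===== CLAIM (what is proved, stated in full; the proofs are below) =====
def Claim_equal_count_spruces : Prop := ∀ (test_cases : List ((Int × Int) × List String)), Dom_count_spruces test_cases → Pre_count_spruces test_cases → Spec_count_spruces test_cases (count_spruces test_cases)

-- ===== LEMMAS AND PROOFS =====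

-- The spruce height at apex (i, j), by fuel-indexed recursion down the rows (A's DP recurrence).
def pvHf (mat : List String) (n m : Int) : Nat → Int → Int → Int
  | 0, _, _ => 0
  | f + 1, i, j =>
      if pvCell mat i j == '*' then
        if i = n - 1 then 1
        else if j = 0 ∨ j = m - 1 then 1
        else
          min (min (pvHf mat n m f (i + 1) (j - 1)) (pvHf mat n m f (i + 1) j))
              (pvHf mat n m f (i + 1) (j + 1)) + 1
      else 0

def pvH (mat : List String) (n m : Int) (i j : Int) : Int := pvHf mat n m (n - i).toNat i j

-- geometric predicate: depth t of a spruce at apex (i, j) fits in the n × m window and is all '*'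
def pvQ (mat : List String) (n m : Int) (i j : Int) (t : Nat) : Prop :=
  i + t < n ∧ 0 ≤ j - t ∧ j + t < m ∧ ∀ c : Int, j - t ≤ c → c ≤ j + t → pvCell mat (i + t) c = '*'

def pvGood (mat : List String) (n m : Int) (i j : Int) (k : Nat) : Prop :=
  ∀ t < k, pvQ mat n m i j t

lemma pvHf_nonneg (mat : List String) (n m : Int) (f : Nat) (i j : Int) :
    0 ≤ pvHf mat n m f i j := by
  induction f generalizing i j with
  | zero => simp [pvHf]
  | succ f ih =>
    simp only [pvHf]
    split_ifs with h1 h2 h3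
    · norm_num
    · norm_num
    · have a := ih (i + 1) (j - 1)
      have b := ih (i + 1) j
      have c := ih (i + 1) (j + 1)
      omega
    · norm_num

lemma pvHf_fuel (mat : List String) (n m : Int) (f1 : Nat) :
    ∀ (f2 : Nat) (i j : Int), i < n → (n - i).toNat ≤ f1 → (n - i).toNat ≤ f2 →
    pvHf mat n m f1 i j = pvHf mat n m f2 i j := by
  induction f1 with
  | zero => intro f2 i j hin h1 h2; omega
  | succ f1 ih =>
    intro f2 i j hin h1 h2
    cases f2 with
    | zero => omega
    | succ f2 =>
      simp only [pvHf]
      split_ifs with h hA hB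
      · rfl
      · rfl
      · rw [ih f2 (i + 1) (j - 1) (by omega) (by omega) (by omega),
          ih f2 (i + 1) j (by omega) (by omega) (by omega),
          ih f2 (i + 1) (j + 1) (by omega) (by omega) (by omega)]
      · rfl

lemma pvH_eq (mat : List String) (n m i j : Int) (hin : i < n) :
    pvH mat n m i j =
      if pvCell mat i j == '*' then
        if i = n - 1 then 1
        else if j = 0 ∨ j = m - 1 then 1
        else
          min (min (pvH mat n m (i + 1) (j - 1)) (pvH mat n m (i + 1) j))
              (pvH mat n m (i + 1) (j + 1)) + 1
      else 0 := by
  have ht : (n - i).toNat = ((n - i).toNat - 1) + 1 := by omega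
  show pvHf mat n m (n - i).toNat i j = _
  rw [ht]
  simp only [pvHf]
  split_ifs with h hA
  · rfl
  · rfl
  · have hin1 : i + 1 < n := by omega
    rw [pvHf_fuel mat n m ((n - i).toNat - 1) ((n - (i + 1)).toNat) (i + 1) (j - 1) hin1 (by omega) (by omega),
      pvHf_fuel mat n m ((n - i).toNat - 1) ((n - (i + 1)).toNat) (i + 1) j hin1 (by omega) (by omega),
      pvHf_fuel mat n m ((n - i).toNat - 1) ((n - (i + 1)).toNat) (i + 1) (j + 1) hin1 (by omega) (by omega)]
    rfl
  · rfl

lemma pvGood_unique (mat : List String) (n m i j : Int) (a b : Nat)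
    (ha : pvGood mat n m i j a) (ha' : ¬ pvQ mat n m i j a)
    (hb : pvGood mat n m i j b) (hb' : ¬ pvQ mat n m i j b) : a = b := by
  rcases lt_trichotomy a b with h | h | h
  · exact absurd (hb a h) ha'
  · exact h
  · exact absurd (ha b h) hb'

lemma pvQ_zero (mat : List String) (n m i j : Int) :
    pvQ mat n m i j 0 ↔ i < n ∧ 0 ≤ j ∧ j < m ∧ pvCell mat i j = '*' := by
  simp only [pvQ, Nat.cast_zero, add_zero, sub_zero]
  constructor
  · rintro ⟨h1, h2, h3, h4⟩
    exact ⟨h1, h2, h3, h4 j le_rfl le_rfl⟩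
  · rintro ⟨h1, h2, h3, h4⟩
    refine ⟨h1, h2, h3, fun c hc1 hc2 => ?_⟩
    have : c = j := le_antisymm hc2 hc1
    rw [this]; exact h4

lemma pvQ_succ (mat : List String) (n m i j : Int) (t : Nat) :
    pvQ mat n m i j (t + 1) ↔
      pvQ mat n m (i + 1) (j - 1) t ∧ pvQ mat n m (i + 1) j t ∧ pvQ mat n m (i + 1) (j + 1) t := by
  simp only [pvQ]
  push_cast
  have e : i + 1 + (t : Int) = i + ((t : Int) + 1) := by ring
  constructor
  · rintro ⟨h1, h2, h3, h4⟩
    refine ⟨⟨by omega, by omega, by omega, fun c hc1 hc2 => ?_⟩,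
            ⟨by omega, by omega, by omega, fun c hc1 hc2 => ?_⟩,
            ⟨by omega, by omega, by omega, fun c hc1 hc2 => ?_⟩⟩ <;>
      · rw [e]; exact h4 c (by omega) (by omega)
  · rintro ⟨⟨a1, a2, a3, a4⟩, ⟨b1, b2, b3, b4⟩, ⟨c1, c2, c3, c4⟩⟩
    refine ⟨by omega, by omega, by omega, fun c hc1 hc2 => ?_⟩
    rw [← e]
    by_cases h : c ≤ j - 1 + t
    · exact a4 c (by omega) (by omega)
    · by_cases h' : j + 1 - t ≤ c
      · exact c4 c (by omega) (by omega)
      · exact b4 c (by omega) (by omega)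

lemma pvGood_mono (mat : List String) (n m i j : Int) {a k : Nat}
    (h : pvGood mat n m i j k) (hak : a ≤ k) : pvGood mat n m i j a :=
  fun t ht => h t (by omega)

lemma pvGood_succ (mat : List String) (n m i j : Int) (k : Nat) :
    pvGood mat n m i j (k + 1) ↔
      pvQ mat n m i j 0 ∧ pvGood mat n m (i + 1) (j - 1) k ∧ pvGood mat n m (i + 1) j k ∧
        pvGood mat n m (i + 1) (j + 1) k := by
  constructor
  · intro h
    exact ⟨h 0 (by omega),
      fun t ht => ((pvQ_succ mat n m i j t).mp (h (t + 1) (by omega))).1,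
      fun t ht => ((pvQ_succ mat n m i j t).mp (h (t + 1) (by omega))).2.1,
      fun t ht => ((pvQ_succ mat n m i j t).mp (h (t + 1) (by omega))).2.2⟩
  · rintro ⟨h0, ha, hb, hc⟩ t ht
    cases t with
    | zero => exact h0
    | succ t => exact (pvQ_succ mat n m i j t).mpr ⟨ha t (by omega), hb t (by omega), hc t (by omega)⟩

lemma pvH_spec (mat : List String) (n m : Int) (f : Nat) :
    ∀ (i j : Int), 0 ≤ i → i < n → 0 ≤ j → j < m → (n - i).toNat ≤ f →
    pvGood mat n m i j (pvHf mat n m f i j).toNat ∧ ¬ pvQ mat n m i j (pvHf mat n m f i j).toNat := by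
  induction f with
  | zero => intro i j hi0 hin hj0 hjm hf; omega
  | succ f ih =>
    intro i j hi0 hin hj0 hjm hf
    by_cases hstar : pvCell mat i j = '*'
    · have hb : (pvCell mat i j == '*') = true := by simp [hstar]
      by_cases hlast : i = n - 1
      · have hv : pvHf mat n m (f + 1) i j = 1 := by simp only [pvHf, hb, if_true]; rw [if_pos hlast]
        rw [hv]
        constructor
        · intro t ht
          have : t = 0 := by omega
          subst this
          exact (pvQ_zero mat n m i j).mpr ⟨hin, hj0, hjm, hstar⟩
        · intro hq
          have := hq.1
          push_cast at this
          omega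
      · by_cases hedge : j = 0 ∨ j = m - 1
        · have hv : pvHf mat n m (f + 1) i j = 1 := by
            simp only [pvHf, hb, if_true]; rw [if_neg hlast, if_pos hedge]
          rw [hv]
          constructor
          · intro t ht
            have : t = 0 := by omega
            subst this
            exact (pvQ_zero mat n m i j).mpr ⟨hin, hj0, hjm, hstar⟩
          · intro hq
            obtain ⟨_, h2, h3, _⟩ := hq
            push_cast at h2 h3
            omega
        · -- interior cell
          have hj1 : j ≠ 0 ∧ j ≠ m - 1 := by tauto
          have hin1 : i + 1 < n := by omega
          have A1 := ih (i + 1) (j - 1) (by omega) hin1 (by omega) (by omega) (by omega)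
          have A2 := ih (i + 1) j (by omega) hin1 (by omega) (by omega) (by omega)
          have A3 := ih (i + 1) (j + 1) (by omega) hin1 (by omega) (by omega) (by omega)
          have N1 := pvHf_nonneg mat n m f (i + 1) (j - 1)
          have N2 := pvHf_nonneg mat n m f (i + 1) j
          have N3 := pvHf_nonneg mat n m f (i + 1) (j + 1)
          set h1 := pvHf mat n m f (i + 1) (j - 1) with hh1
          set h2 := pvHf mat n m f (i + 1) j with hh2
          set h3 := pvHf mat n m f (i + 1) (j + 1) with hh3
          have hv : pvHf mat n m (f + 1) i j = min (min h1 h2) h3 + 1 := by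
            simp only [pvHf, hb, if_true]; rw [if_neg hlast, if_neg hedge]
          rw [hv]
          set M := min (min h1 h2) h3 with hM
          have hMle : M ≤ h1 ∧ M ≤ h2 ∧ M ≤ h3 ∧ (M = h1 ∨ M = h2 ∨ M = h3) := by omega
          have htn : (M + 1).toNat = M.toNat + 1 := by omega
          rw [htn]
          constructor
          · rw [pvGood_succ]
            exact ⟨(pvQ_zero mat n m i j).mpr ⟨hin, hj0, hjm, hstar⟩,
              pvGood_mono mat n m (i + 1) (j - 1) A1.1 (by omega),
              pvGood_mono mat n m (i + 1) j A2.1 (by omega),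
              pvGood_mono mat n m (i + 1) (j + 1) A3.1 (by omega)⟩
          · intro hq
            rw [pvQ_succ] at hq
            rcases hMle.2.2.2 with hE | hE | hE
            · exact A1.2 (by rw [show h1.toNat = M.toNat by omega]; exact hq.1)
            · exact A2.2 (by rw [show h2.toNat = M.toNat by omega]; exact hq.2.1)
            · exact A3.2 (by rw [show h3.toNat = M.toNat by omega]; exact hq.2.2)
    · have hb : (pvCell mat i j == '*') = false := by simp [hstar]
      have hv : pvHf mat n m (f + 1) i j = 0 := by simp only [pvHf, hb, Bool.false_eq_true, if_false]
      rw [hv]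
      refine ⟨fun t ht => by omega, fun hq => hstar ?_⟩
      exact ((pvQ_zero mat n m i j).mp hq).2.2.2

lemma pvRowAll_iff (mat : List String) (a l r : Int) :
    pvRowAll mat a l r = true ↔ ∀ c : Int, l ≤ c → c ≤ r → pvCell mat a c = '*' := by
  simp only [pvRowAll, List.all_eq_true, PySem.List.mem_pyRange_one, beq_iff_eq]
  constructor
  · intro h c h1 h2; exact h c ⟨h1, by omega⟩
  · rintro h c ⟨h1, h2⟩; exact h c h1 (by omega)

lemma pvApexLoop_spec (mat : List String) (n m i j : Int) (fuel : Nat) :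
    ∀ k : Nat, pvGood mat n m i j k → (n - i).toNat + 1 ≤ fuel + k →
    ∃ r : Nat, pvApexLoop mat n m i j fuel (k : Int) = (r : Int) ∧
      pvGood mat n m i j r ∧ ¬ pvQ mat n m i j r := by
  induction fuel with
  | zero =>
    intro k hg hfuel
    refine ⟨k, rfl, hg, fun hq => ?_⟩
    have := hq.1
    omega
  | succ fuel ih =>
    intro k hg hfuel
    simp only [pvApexLoop]
    by_cases hc : i + (k : Int) < n ∧ 0 ≤ j - (k : Int) ∧ j + (k : Int) < m ∧
        pvRowAll mat (i + (k : Int)) (j - (k : Int)) (j + (k : Int)) = true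
    · rw [if_pos hc]
      obtain ⟨c1, c2, c3, c4⟩ := hc
      have hQ : pvQ mat n m i j k :=
        ⟨c1, c2, c3, fun c h1 h2 => (pvRowAll_iff mat (i + (k : Int)) (j - (k : Int)) (j + (k : Int))).mp c4 c h1 h2⟩
      have hg' : pvGood mat n m i j (k + 1) := by
        intro t ht
        rcases Nat.lt_succ_iff_lt_or_eq.mp ht with h | h
        · exact hg t h
        · subst h; exact hQ
      have hrec := ih (k + 1) hg' (by omega)
      rw [show ((k : Int) + 1) = (((k + 1 : Nat)) : Int) by push_cast; ring]
      exact hrec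
    · rw [if_neg hc]
      refine ⟨k, rfl, hg, fun hq => hc ⟨hq.1, hq.2.1, hq.2.2.1, ?_⟩⟩
      exact (pvRowAll_iff mat (i + (k : Int)) (j - (k : Int)) (j + (k : Int))).mpr hq.2.2.2

lemma pvApex_eq_H (mat : List String) (n m i j : Int)
    (hi0 : 0 ≤ i) (hin : i < n) (hj0 : 0 ≤ j) (hjm : j < m) :
    pvApexLoop mat n m i j ((n - i).toNat + 1) 0 = pvH mat n m i j := by
  obtain ⟨r, hr, hg, hq⟩ :=
    pvApexLoop_spec mat n m i j ((n - i).toNat + 1) 0 (fun t ht => absurd ht (by omega)) (by omega)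
  have hH := pvH_spec mat n m ((n - i).toNat) i j hi0 hin hj0 hjm le_rfl
  have hr' : r = (pvH mat n m i j).toNat :=
    pvGood_unique mat n m i j r (pvH mat n m i j).toNat hg hq hH.1 hH.2
  have hnn := pvHf_nonneg mat n m (n - i).toNat i j
  rw [Nat.cast_zero] at hr
  rw [hr, hr']
  exact Int.toNat_of_nonneg hnn

-- ---- A-side: table invariant ----

def pvRowH (mat : List String) (n m : Int) (i : Int) : List Int :=
  (List.range m.toNat).map (fun (j : Nat) => pvH mat n m i (j : Int))

def pvZrow (m : Int) : List Int := List.replicate m.toNat (0 : Int)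

def pvRowP (mat : List String) (n m : Int) (i : Int) (jcap : Nat) : List Int :=
  (List.range m.toNat).map (fun (c : Nat) => if c < jcap then pvH mat n m i (c : Int) else 0)

def pvTblP (mat : List String) (n m : Int) (i : Int) (jcap : Nat) : List (List Int) :=
  (List.range n.toNat).map (fun (k : Nat) =>
    if i < (k : Int) then pvRowH mat n m k
    else if (k : Int) = i then pvRowP mat n m i jcap
    else pvZrow m)

def pvRowSum (mat : List String) (n m : Int) (i : Int) : Int :=
  ((List.range m.toNat).map (fun (j : Nat) => pvH mat n m i (j : Int))).sum

def pvS (mat : List String) (n m : Int) (r : Int) : Int :=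
  ((List.range n.toNat).map (fun (k : Nat) => if r ≤ (k : Int) then pvRowSum mat n m k else 0)).sum

-- the inner-loop body of A's port, named for the proofs (definitionally the lambda in pvCaseA)
def pvStepJ (mat : List String) (n m i : Int) (st : List (List Int) × Int) (j : Int) : List (List Int) × Int :=
  if pvCell mat i j == '*' then
    if i == n - 1 then
      (PySem.List.pySetD st.1 i (PySem.List.pySetD (PySem.List.pyGetD st.1 i []) j 1), st.2 + 1)
    else if j == 0 || j == m - 1 then
      (PySem.List.pySetD st.1 i (PySem.List.pySetD (PySem.List.pyGetD st.1 i []) j 1), st.2 + 1)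
    else
      let x := PySem.List.slice (PySem.List.pyGetD st.1 (i + 1) []) (some (j - 1)) (some (j + 2))
      let v := (PySem.List.min? x (fun y => y)).getD 0 + 1
      (PySem.List.pySetD st.1 i (PySem.List.pySetD (PySem.List.pyGetD st.1 i []) j v), st.2 + v)
  else st

def pvStepI (mat : List String) (n m : Int) (st : List (List Int) × Int) (i : Int) : List (List Int) × Int :=
  (PySem.List.pyRange 0 m 1).foldl (pvStepJ mat n m i) st

def pvTbl (mat : List String) (n m : Int) (r : Int) : List (List Int) :=
  (List.range n.toNat).map (fun (k : Nat) => if r ≤ (k : Int) then pvRowH mat n m k else pvZrow m)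

def pvPsum (mat : List String) (n m : Int) (i : Int) (jN : Nat) : Int :=
  ((List.range jN).map (fun (j : Nat) => pvH mat n m i (j : Int))).sum

lemma pvRowP_zero (mat : List String) (n m i : Int) : pvRowP mat n m i 0 = pvZrow m := by
  unfold pvRowP pvZrow
  rw [List.eq_replicate_iff]
  refine ⟨by simp, ?_⟩
  intro b hb
  simp only [List.mem_map, List.mem_range] at hb
  obtain ⟨c, _, hc⟩ := hb
  simp at hc
  omega

lemma pvRowP_full (mat : List String) (n m i : Int) : pvRowP mat n m i m.toNat = pvRowH mat n m i := by
  unfold pvRowP pvRowH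
  apply List.map_congr_left
  intro c hc
  rw [List.mem_range] at hc
  simp [hc]

lemma pvTbl_succ_row (mat : List String) (n m i : Int) : pvTbl mat n m (i + 1) = pvTblP mat n m i 0 := by
  unfold pvTbl pvTblP
  apply List.map_congr_left
  intro k _
  by_cases h : i < (k : Int)
  · rw [if_pos (by omega), if_pos h]
  · rw [if_neg (by omega), if_neg h]
    by_cases h2 : (k : Int) = i
    · rw [if_pos h2, pvRowP_zero]
    · rw [if_neg h2]

lemma pvTblP_full (mat : List String) (n m i : Int) : pvTblP mat n m i m.toNat = pvTbl mat n m i := by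
  unfold pvTbl pvTblP
  apply List.map_congr_left
  intro k _
  by_cases h : i < (k : Int)
  · rw [if_pos h, if_pos (by omega)]
  · by_cases h2 : (k : Int) = i
    · rw [if_neg h, if_pos h2, if_pos (by omega), pvRowP_full, h2]
    · rw [if_neg h, if_neg h2, if_neg (by omega)]

lemma pvTblP_length (mat : List String) (n m i : Int) (jN : Nat) :
    (pvTblP mat n m i jN).length = n.toNat := by simp [pvTblP]

lemma pvTblP_get_self (mat : List String) (n m i : Int) (hi0 : 0 ≤ i) (hin : i < n) (jN : Nat) :
    PySem.List.pyGetD (pvTblP mat n m i jN) i [] = pvRowP mat n m i jN := by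
  rw [PySem.List.pyGetD_eq_getElem _ _ hi0 (by rw [pvTblP_length]; omega)]
  simp only [pvTblP, List.getElem_map, List.getElem_range]
  rw [Int.toNat_of_nonneg hi0, if_neg (lt_irrefl i), if_pos rfl]

lemma pvTblP_get_below (mat : List String) (n m i : Int) (hi0 : 0 ≤ i) (hin1 : i + 1 < n) (jN : Nat) :
    PySem.List.pyGetD (pvTblP mat n m i jN) (i + 1) [] = pvRowH mat n m (i + 1) := by
  rw [PySem.List.pyGetD_eq_getElem _ _ (by omega) (by rw [pvTblP_length]; omega)]
  simp only [pvTblP, List.getElem_map, List.getElem_range]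
  rw [Int.toNat_of_nonneg (by omega : (0:Int) ≤ i + 1), if_pos (by omega)]

lemma pvRowP_set (mat : List String) (n m i : Int) (jN : Nat) :
    PySem.List.pySetD (pvRowP mat n m i jN) (jN : Int) (pvH mat n m i (jN : Int)) =
      pvRowP mat n m i (jN + 1) := by
  rw [PySem.List.pySetD_natCast]
  apply List.ext_getElem
  · simp [pvRowP]
  · intro c h1 h2
    rw [List.getElem_set]
    simp only [pvRowP, List.getElem_map, List.getElem_range]
    by_cases hc : jN = c
    · subst hc
      rw [if_pos rfl, if_pos (by omega)]
    · rw [if_neg hc]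
      by_cases hlt : c < jN
      · rw [if_pos hlt, if_pos (by omega)]
      · rw [if_neg hlt, if_neg (by omega)]

lemma pvTblP_set (mat : List String) (n m i : Int) (hi0 : 0 ≤ i) (jN : Nat) :
    PySem.List.pySetD (pvTblP mat n m i jN) i (pvRowP mat n m i (jN + 1)) =
      pvTblP mat n m i (jN + 1) := by
  rw [PySem.List.pySetD_of_nonneg _ _ hi0]
  apply List.ext_getElem
  · simp [pvTblP]
  · intro k h1 h2
    rw [List.getElem_set]
    simp only [pvTblP, List.getElem_map, List.getElem_range]
    by_cases hk : i.toNat = k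
    · rw [if_pos hk, if_neg (by omega), if_pos (by omega)]
    · rw [if_neg hk]
      by_cases hlt : i < (k : Int)
      · rw [if_pos hlt, if_pos hlt]
      · rw [if_neg hlt, if_neg hlt, if_neg (by omega), if_neg (by omega)]

lemma pvSliceRow (M : Nat) (g : Nat → Int) (a : Nat) (h : a + 3 ≤ M) :
    (((List.range M).map g).drop a).take 3 = [g a, g (a + 1), g (a + 2)] := by
  apply List.ext_getElem
  · simp; omega
  · intro idx h1 h2
    have hidx : idx < 3 := by simpa using h2
    rw [List.getElem_take, List.getElem_drop]
    simp only [List.getElem_map, List.getElem_range]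
    interval_cases idx
    · norm_num
    · norm_num
    · norm_num

lemma pvStepJ_eq (mat : List String) (n m i : Int) (hi0 : 0 ≤ i) (hin : i < n)
    (jN : Nat) (hj : jN < m.toNat) (T : Int) :
    pvStepJ mat n m i (pvTblP mat n m i jN, T) (jN : Int) =
      (pvTblP mat n m i (jN + 1), T + pvH mat n m i (jN : Int)) := by
  unfold pvStepJ
  dsimp only
  by_cases hstar : pvCell mat i (jN : Int) = '*'
  · have hb : (pvCell mat i (jN : Int) == '*') = true := by simp [hstar]
    rw [if_pos hb]
    by_cases hlast : i = n - 1
    · have hH : pvH mat n m i (jN : Int) = 1 := by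
        rw [pvH_eq mat n m i (jN : Int) hin, if_pos hb, if_pos hlast]
      rw [if_pos (show (i == n - 1) = true by simp [hlast])]
      rw [pvTblP_get_self mat n m i hi0 hin jN, show (1 : Int) = pvH mat n m i (jN : Int) from hH.symm,
        pvRowP_set mat n m i jN, pvTblP_set mat n m i hi0 jN]
    · rw [if_neg (show ¬ (i == n - 1) = true by simp [hlast])]
      by_cases hedge : (jN : Int) = 0 ∨ (jN : Int) = m - 1
      · have hH : pvH mat n m i (jN : Int) = 1 := by
          rw [pvH_eq mat n m i (jN : Int) hin, if_pos hb, if_neg hlast, if_pos hedge]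
        rw [if_pos (show (((jN : Int) == 0) || ((jN : Int) == m - 1)) = true by
          rcases hedge with h | h <;> simp [h])]
        rw [pvTblP_get_self mat n m i hi0 hin jN, show (1 : Int) = pvH mat n m i (jN : Int) from hH.symm,
          pvRowP_set mat n m i jN, pvTblP_set mat n m i hi0 jN]
      · have h0 : (jN : Int) ≠ 0 ∧ (jN : Int) ≠ m - 1 := by tauto
        have hjN1 : 1 ≤ jN := by omega
        have hjN2 : jN + 2 ≤ m.toNat := by omega
        have hin1 : i + 1 < n := by omega
        rw [if_neg (show ¬ (((jN : Int) == 0) || ((jN : Int) == m - 1)) = true by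
          simp only [Bool.or_eq_true, beq_iff_eq, not_or]; exact ⟨by omega, by omega⟩)]
        rw [pvTblP_get_below mat n m i hi0 hin1 jN]
        unfold pvRowH
        rw [show ((jN : Int) - 1) = (((jN - 1 : Nat)) : Int) by omega,
          show ((jN : Int) + 2) = (((jN + 2 : Nat)) : Int) by omega,
          PySem.List.slice_natCast, show (jN + 2) - (jN - 1) = 3 from by omega,
          pvSliceRow m.toNat (fun (c : Nat) => pvH mat n m (i + 1) (c : Int)) (jN - 1) (by omega),
          show jN - 1 + 1 = jN from by omega, show jN - 1 + 2 = jN + 1 from by omega,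
          PySem.List.min?_id_cons]
        dsimp only [List.foldl_cons, List.foldl_nil, Option.getD_some]
        have hH : pvH mat n m i (jN : Int) =
            min (min (pvH mat n m (i + 1) ((jN : Int) - 1)) (pvH mat n m (i + 1) (jN : Int)))
              (pvH mat n m (i + 1) ((jN : Int) + 1)) + 1 := by
          rw [pvH_eq mat n m i (jN : Int) hin, if_pos hb, if_neg hlast, if_neg hedge]
        rw [show (((jN - 1 : Nat)) : Int) = (jN : Int) - 1 by omega,
          show (((jN + 1 : Nat)) : Int) = (jN : Int) + 1 by omega,
          ← hH, pvTblP_get_self mat n m i hi0 hin jN,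
          pvRowP_set mat n m i jN, pvTblP_set mat n m i hi0 jN]
  · have hb : (pvCell mat i (jN : Int) == '*') = false := by simp [hstar]
    rw [if_neg (by simp [hb])]
    have hH0 : pvH mat n m i (jN : Int) = 0 := by
      rw [pvH_eq mat n m i (jN : Int) hin, if_neg (by simp [hb])]
    have hrowP : pvRowP mat n m i (jN + 1) = pvRowP mat n m i jN := by
      unfold pvRowP
      apply List.map_congr_left
      intro c _
      by_cases h : c < jN
      · rw [if_pos (by omega), if_pos h]
      · by_cases h2 : c = jN
        · subst h2
          rw [if_pos (by omega), if_neg h]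
          exact hH0
        · rw [if_neg (by omega), if_neg h]
    have htbl : pvTblP mat n m i (jN + 1) = pvTblP mat n m i jN := by
      unfold pvTblP
      apply List.map_congr_left
      intro k _
      rw [hrowP]
    rw [htbl, hH0, add_zero]

lemma pvRowFold (mat : List String) (n m i : Int) (hi0 : 0 ≤ i) (hin : i < n) (T : Int) :
    pvStepI mat n m (pvTbl mat n m (i + 1), T) i = (pvTbl mat n m i, T + pvRowSum mat n m i) := by
  unfold pvStepI
  by_cases hm : m ≤ 0
  · rw [PySem.List.pyRange_one_eq_nil hm]
    simp only [List.foldl_nil]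
    have hmt : m.toNat = 0 := by omega
    have hrs : pvRowSum mat n m i = 0 := by unfold pvRowSum; rw [hmt]; simp
    have htb : pvTbl mat n m (i + 1) = pvTbl mat n m i := by
      unfold pvTbl pvRowH pvZrow; rw [hmt]; simp
    rw [htb, hrs, add_zero]
  · replace hm : 0 < m := by omega
    have hrange : PySem.List.pyRange 0 m 1 = (List.range m.toNat).map (fun (k : Nat) => (k : Int)) := by
      rw [PySem.List.pyRange_one]; simp
    rw [hrange]
    have key : ∀ jN : Nat, jN ≤ m.toNat →
        ((List.range jN).map (fun (k : Nat) => (k : Int))).foldl (pvStepJ mat n m i) (pvTblP mat n m i 0, T)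
          = (pvTblP mat n m i jN, T + pvPsum mat n m i jN) := by
      intro jN
      induction jN with
      | zero => intro _; simp [pvPsum]
      | succ jN ih =>
        intro hle
        rw [List.range_succ, List.map_append, List.foldl_append, ih (by omega)]
        simp only [List.map_cons, List.map_nil, List.foldl_cons, List.foldl_nil]
        rw [pvStepJ_eq mat n m i hi0 hin jN (by omega) _]
        unfold pvPsum
        rw [List.range_succ, List.map_append, List.sum_append]
        simp [add_assoc]
    have hkey := key m.toNat le_rfl
    rw [pvTbl_succ_row mat n m i, hkey, pvTblP_full]
    rfl

lemma pvS_succ (mat : List String) (n m : Int) (rN : Nat) (hr : (rN : Int) < n) :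
    pvS mat n m (rN : Int) = pvS mat n m ((rN : Int) + 1) + pvRowSum mat n m (rN : Int) := by
  have main : ∀ N : Nat, rN < N →
      ((List.range N).map (fun (k : Nat) => if ((rN : Int)) ≤ (k : Int) then pvRowSum mat n m (k : Int) else 0)).sum
        = ((List.range N).map (fun (k : Nat) => if ((rN : Int) + 1) ≤ (k : Int) then pvRowSum mat n m (k : Int) else 0)).sum
          + pvRowSum mat n m (rN : Int) := by
    intro N
    induction N with
    | zero => intro h; omega
    | succ N ih =>
      intro h
      rw [List.range_succ, List.map_append, List.sum_append, List.map_append, List.sum_append]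
      simp only [List.map_cons, List.map_nil, List.sum_cons, List.sum_nil, add_zero]
      by_cases hlt : rN < N
      · rw [ih hlt, if_pos (by omega : ((rN : Int)) ≤ (N : Int)), if_pos (by omega : ((rN : Int) + 1) ≤ (N : Int))]
        ring
      · have hEq : rN = N := by omega
        subst hEq
        have z1 : ((List.range rN).map (fun (k : Nat) => if ((rN : Int)) ≤ (k : Int) then pvRowSum mat n m (k : Int) else 0)).sum = 0 := by
          apply List.sum_eq_zero
          intro x hx
          simp only [List.mem_map, List.mem_range] at hx
          obtain ⟨k, hk, he⟩ := hx
          rw [← he, if_neg (by omega)]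
        have z2 : ((List.range rN).map (fun (k : Nat) => if ((rN : Int) + 1) ≤ (k : Int) then pvRowSum mat n m (k : Int) else 0)).sum = 0 := by
          apply List.sum_eq_zero
          intro x hx
          simp only [List.mem_map, List.mem_range] at hx
          obtain ⟨k, hk, he⟩ := hx
          rw [← he, if_neg (by omega)]
        rw [z1, z2, if_pos (by omega : ((rN : Int)) ≤ (rN : Int)), if_neg (by omega : ¬ ((rN : Int) + 1) ≤ (rN : Int))]
        ring
  unfold pvS
  exact main n.toNat (by omega)

lemma pvOuterFold (mat : List String) (n m : Int) (rN : Nat) (hr : (rN : Int) ≤ n) :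
    (PySem.List.pyRange ((rN : Int) - 1) (-1) (-1)).foldl (pvStepI mat n m)
        (pvTbl mat n m (rN : Int), pvS mat n m (rN : Int)) =
      (pvTbl mat n m 0, pvS mat n m 0) := by
  induction rN with
  | zero =>
    rw [show ((0 : Nat) : Int) - 1 = -1 by norm_num, PySem.List.pyRange_neg_one_eq_nil (by omega)]
    simp
  | succ rN ih =>
    rw [show (((rN + 1 : Nat)) : Int) - 1 = (rN : Int) by push_cast; ring,
      PySem.List.pyRange_neg_one_cons (by omega : (-1 : Int) < (rN : Int)), List.foldl_cons,
      show (((rN + 1 : Nat)) : Int) = (rN : Int) + 1 by push_cast; ring,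
      pvRowFold mat n m (rN : Int) (by positivity) (by push_cast at hr; omega) _,
      ← pvS_succ mat n m rN (by push_cast at hr; omega)]
    exact ih (by push_cast at hr ⊢; omega)

lemma pvCaseB_eq_S (mat : List String) (n m : Int) :
    pvCaseB ((n, m), mat) = pvS mat n m 0 := by
  unfold pvCaseB
  dsimp only
  have hin : ∀ (t : Int), ∀ i ∈ PySem.List.pyRange 0 n 1,
      (PySem.List.pyRange 0 m 1).foldl (fun total j =>
        if pvCell mat i j == '*' then
          total + pvApexLoop mat n m i j ((n - i).toNat + 1) 0
        else total) t = t + pvRowSum mat n m i := by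
    intro t i hi
    rw [PySem.List.mem_pyRange_one] at hi
    have step : ∀ (acc : Int), ∀ j ∈ PySem.List.pyRange 0 m 1,
        (if pvCell mat i j == '*' then
          acc + pvApexLoop mat n m i j ((n - i).toNat + 1) 0
        else acc) = acc + pvH mat n m i j := by
      intro acc j hj
      rw [PySem.List.mem_pyRange_one] at hj
      by_cases hstar : pvCell mat i j = '*'
      · rw [if_pos (by simp [hstar]), pvApex_eq_H mat n m i j hi.1 hi.2 hj.1 hj.2]
      · rw [if_neg (by simp [hstar])]
        have h0 : pvH mat n m i j = 0 := by
          rw [pvH_eq mat n m i j hi.2, if_neg (by simp [hstar])]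
        rw [h0, add_zero]
    rw [PySem.List.foldl_congr_mem _ _ _ _ step, PySem.List.foldl_add]
    congr 1
    unfold pvRowSum
    rw [PySem.List.pyRange_one, List.map_map]
    simp [Function.comp_def]
  rw [PySem.List.foldl_congr_mem _ _ _ _ hin, PySem.List.foldl_add, zero_add]
  unfold pvS
  rw [PySem.List.pyRange_one, List.map_map]
  apply congrArg List.sum
  rw [show (n - 0).toNat = n.toNat by omega]
  apply List.map_congr_left
  intro k _
  simp only [Function.comp_apply, zero_add]
  rw [if_pos (by positivity : (0 : Int) ≤ (k : Int))]

lemma pvCaseA_eq_caseB (tc : (Int × Int) × List String) : pvCaseA tc = pvCaseB tc := by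
  obtain ⟨⟨n, m⟩, mat⟩ := tc
  by_cases hn : n ≤ 0
  · have hA : pvCaseA ((n, m), mat) = 0 := by
      unfold pvCaseA
      dsimp only
      rw [PySem.List.pyRange_neg_one_eq_nil (by omega)]
      rfl
    have hB : pvCaseB ((n, m), mat) = 0 := by
      unfold pvCaseB
      dsimp only
      rw [PySem.List.pyRange_one_eq_nil (show n ≤ (0 : Int) by omega)]
      rfl
    rw [hA, hB]
  · replace hn : 0 < n := by omega
    have hb0row : (PySem.List.pyRange 0 m 1).map (fun _ => (0 : Int)) = pvZrow m := by
      rw [PySem.List.pyRange_one]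
      unfold pvZrow
      rw [List.eq_replicate_iff]
      constructor
      · simp
      · intro b hb
        simp only [List.mem_map] at hb
        obtain ⟨k, _, hk⟩ := hb
        exact hk.symm
    have hb0 : (PySem.List.pyRange 0 n 1).map
        (fun _ => (PySem.List.pyRange 0 m 1).map (fun _ => (0 : Int))) = pvTbl mat n m n := by
      rw [hb0row, PySem.List.pyRange_one]
      unfold pvTbl
      have h1 : ((List.range (n - 0).toNat).map (fun (k : Nat) => (0 : Int) + (k : Int))).map (fun _ => pvZrow m)
          = List.replicate n.toNat (pvZrow m) := by
        rw [List.eq_replicate_iff]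
        constructor
        · rw [List.length_map, List.length_map, List.length_range]; omega
        · intro b hb
          simp only [List.mem_map] at hb
          obtain ⟨k, _, hk⟩ := hb
          exact hk.symm
      have h2 : (List.range n.toNat).map (fun (k : Nat) =>
          if n ≤ (k : Int) then pvRowH mat n m (k : Int) else pvZrow m) = List.replicate n.toNat (pvZrow m) := by
        rw [List.eq_replicate_iff]
        constructor
        · simp
        · intro b hb
          simp only [List.mem_map, List.mem_range] at hb
          obtain ⟨k, hk, he⟩ := hb
          rw [← he, if_neg (by omega)]
      rw [h1, h2]
    have hS : pvS mat n m n = 0 := by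
      unfold pvS
      apply List.sum_eq_zero
      intro x hx
      simp only [List.mem_map, List.mem_range] at hx
      obtain ⟨k, hk, he⟩ := hx
      rw [← he, if_neg (by omega)]
    have hA : pvCaseA ((n, m), mat) =
        ((PySem.List.pyRange (n - 1) (-1) (-1)).foldl (pvStepI mat n m)
          (pvTbl mat n m n, pvS mat n m n)).2 := by
      unfold pvCaseA
      dsimp only
      rw [hb0, hS]
      rfl
    have hnn : ((n.toNat : Nat) : Int) = n := Int.toNat_of_nonneg (by omega)
    have houter := pvOuterFold mat n m n.toNat (by omega)
    rw [hnn] at houter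
    rw [hA, houter, pvCaseB_eq_S]

-- ===== VERDICT (by name: the statement is the Claim_ definition above) =====
theorem count_spruces_spec : Claim_equal_count_spruces := by
  intro tcs _ _
  unfold Spec_count_spruces count_spruces count_spruces_alt
  rw [PySem.List.foldl_append_singleton_eq_map, List.nil_append]
  exact List.map_congr_left fun tc _ => pvCaseA_eq_caseB tc
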